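-- pv_equiv track=rewrite | github.com/pereiraR3/-Computational-Methods | methods.py | subtrair1
-- ===== SOURCE A (Python) =====
-- def subtrair1(value):
--     digit = list(value)
--     carry = 1
--     for i in range(len(value) - 1, -1, -1):
--         if carry > 0:
--             if digit[i] == "0":
--                 digit[i] = "1"
--             elif digit[i] == "1":
--                 digit[i] = "0"
--                 carry = 0
--     return digit
-- ===== SOURCE B (Python) =====
-- def subtrair1(value):
--     digit = list(value)
--     idx = None
--     for i, c in enumerate(digit):
--         if c == "1":
--             idx = i
--     if idx is None:
--         return ["1" if c == "0" else c for c in digit]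
--     return digit[:idx] + ["0"] + ["1" if c == "0" else c for c in digit[idx + 1:]]
-- ===== Notes on version B (the rewrite author's own statement) =====
-- stated objective: alternative
-- what changed: Replaces the carry-propagation loop over indices (mutating the list right-to-left until the carry is consumed) with a bit-trick decomposition: one scan finds the rightmost '1', then the answer is assembled from slices (prefix unchanged, that '1' cleared, the suffix's '0's set), with a map-all-'0's branch when no '1' exists.
import Mathlib
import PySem

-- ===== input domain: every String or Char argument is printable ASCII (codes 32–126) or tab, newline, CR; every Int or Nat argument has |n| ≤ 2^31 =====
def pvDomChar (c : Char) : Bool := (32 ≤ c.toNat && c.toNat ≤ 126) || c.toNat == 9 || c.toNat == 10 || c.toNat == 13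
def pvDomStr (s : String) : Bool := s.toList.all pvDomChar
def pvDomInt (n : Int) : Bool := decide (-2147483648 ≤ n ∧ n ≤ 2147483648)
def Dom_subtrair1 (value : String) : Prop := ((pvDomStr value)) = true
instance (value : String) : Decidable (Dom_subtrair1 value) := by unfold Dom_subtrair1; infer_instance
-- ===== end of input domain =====

-- B replaces A's right-to-left carry-propagation loop by the bit-trick decomposition
-- "find the rightmost '1', clear it, set the '0's to its right" (one forward scan + slices).

-- ===== PORT A =====
-- the body of A's 'for i in range(len(value)-1, -1, -1)' loop, acting on the state (digit, carry)
def pvStepA (st : List String × Int) (i : Int) : List String × Int :=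
  if st.2 > 0 then
    if PySem.List.pyGetD st.1 i "" = "0" then (PySem.List.pySetD st.1 i "1", st.2)
    else if PySem.List.pyGetD st.1 i "" = "1" then (PySem.List.pySetD st.1 i "0", 0)
    else st
  else st

def subtrair1 (value : String) : List String :=
  let digit : List String := value.toList.map (fun c => String.ofList [c])
  ((PySem.List.pyRange (PySem.Str.len value - 1) (-1) (-1)).foldl pvStepA (digit, 1)).1

-- ===== PORT B =====
-- '"1" if c == "0" else c'
def pvFlip0 (c : String) : String := if c = "0" then "1" else c

-- the scan tracking the last index whose element is "1" (None when there is none)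
def pvLastOne (digit : List String) : Option Int :=
  (PySem.List.enumerate digit 0).foldl (fun acc p => if p.2 = "1" then some p.1 else acc) none

-- the rest of B on the digit list: map-all branch, or slice / cleared bit / flipped suffix
def pvBCore (digit : List String) : List String :=
  match pvLastOne digit with
  | none => digit.map pvFlip0
  | some k =>
      PySem.List.slice digit none (some k) ++ ["0"] ++
        (PySem.List.slice digit (some (k + 1)) none).map pvFlip0

def subtrair1_alt (value : String) : List String :=
  pvBCore (value.toList.map (fun c => String.ofList [c]))

-- ===== PRECONDITION & SPEC =====
def Spec_subtrair1 (value : String) (out : List String) : Prop := out = subtrair1_alt value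
instance (value : String) (out : List String) : Decidable (Spec_subtrair1 value out) := by unfold Spec_subtrair1; infer_instance

-- ===== CLAIM (what is proved, stated in full; the proofs are below) =====
def Claim_equal_subtrair1 : Prop := ∀ (value : String), Dom_subtrair1 value → Spec_subtrair1 value (subtrair1 value)

-- ===== LEMMAS AND PROOFS =====

-- common reference point: the carry phase of the subtraction, read off the reversed digit list
def pvGo : List String → List String
  | [] => []
  | y :: r => if y = "0" then "1" :: pvGo r else if y = "1" then "0" :: r else y :: pvGo r

-- once the carry is 0, A's loop leaves the state unchanged
lemma pvFoldA_id (r : List Int) (d : List String) : r.foldl pvStepA (d, 0) = (d, 0) := by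
  induction r with
  | nil => rfl
  | cons i r ih => simpa [pvStepA] using ih

-- one step of A's loop at the boundary index ys.length of ys ++ y :: zs
lemma pvStepA_mid (ys zs : List String) (y : String) :
    pvStepA (ys ++ y :: zs, 1) (ys.length : Int)
      = if y = "0" then (ys ++ "1" :: zs, 1)
        else if y = "1" then (ys ++ "0" :: zs, 0)
        else (ys ++ y :: zs, 1) := by
  simp [pvStepA, PySem.List.pyGetD_natCast]

-- A's countdown loop over the first ys.length positions, run right to left, computes pvGo on ys.reverse
lemma pvFoldA_main (ys zs : List String) :
    (PySem.List.pyRange ((ys.length : Int) - 1) (-1) (-1)).foldl pvStepA (ys ++ zs, 1)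
      = ((pvGo ys.reverse).reverse ++ zs, if "1" ∈ ys then 0 else 1) := by
  induction ys using List.reverseRecOn generalizing zs with
  | nil =>
      simp [PySem.List.pyRange_neg_one_eq_nil, pvGo]
  | append_singleton ys y ih =>
      have hlen : (((ys ++ [y]).length : Int) - 1) = (ys.length : Int) := by simp
      have hsplit : (ys ++ [y]) ++ zs = ys ++ y :: zs := by simp
      rw [hlen, PySem.List.pyRange_neg_one_cons (by omega), List.foldl_cons, hsplit, pvStepA_mid]
      rcases eq_or_ne y "0" with h0 | h0
      · subst h0
        rw [if_pos rfl, show ys ++ "1" :: zs = ys ++ ("1" :: zs) from rfl, ih ("1" :: zs)]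
        simp [pvGo]
      · rcases eq_or_ne y "1" with h1 | h1
        · subst h1
          rw [if_neg (by decide), if_pos rfl, pvFoldA_id]
          simp [pvGo]
        · rw [if_neg h0, if_neg h1,
            show ys ++ y :: zs = ys ++ (y :: zs) from rfl, ih (y :: zs)]
          simp [pvGo, h0, h1, Ne.symm h1]

-- B's scan on xs ++ [y]: the last "1" is at xs.length if y = "1", else where it is in xs
lemma pvLastOne_append (xs : List String) (y : String) :
    pvLastOne (xs ++ [y]) = if y = "1" then some (xs.length : Int) else pvLastOne xs := by
  unfold pvLastOne
  rw [PySem.List.enumerate_append, List.foldl_append]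
  simp [PySem.List.enumerate_cons]

-- the index B's scan reports is a valid position
lemma pvLastOne_bound (xs : List String) (k : Int) (h : pvLastOne xs = some k) :
    0 ≤ k ∧ k.toNat < xs.length := by
  induction xs using List.reverseRecOn with
  | nil => simp [pvLastOne, PySem.List.enumerate_nil] at h
  | append_singleton xs y ih =>
      rw [pvLastOne_append] at h
      by_cases h1 : y = "1"
      · rw [if_pos h1] at h
        obtain rfl : (xs.length : Int) = k := by simpa using h
        simp
      · rw [if_neg h1] at h
        obtain ⟨h2, h3⟩ := ih h
        simp
        omega

-- B's slice assembly also computes pvGo on the reversed digit list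
lemma pvB_main (l : List String) : pvBCore l = (pvGo l.reverse).reverse := by
  induction l using List.reverseRecOn with
  | nil => rfl
  | append_singleton xs y ih =>
      unfold pvBCore
      rw [pvLastOne_append]
      by_cases h1 : y = "1"
      · subst h1
        rw [if_pos rfl]
        simp [PySem.List.slice_to_natCast, pvGo]
        rw [show ((xs.length : Int) + 1) = ((xs.length + 1 : Nat) : Int) by push_cast; ring,
            PySem.List.slice_from_natCast]
        simp
      · rw [if_neg h1]
        unfold pvBCore at ih
        cases hL : pvLastOne xs with
        | none =>
            rw [hL] at ih
            simp [pvGo, h1, ih, pvFlip0]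
            by_cases h0 : y = "0" <;> simp [h0]
        | some k =>
            obtain ⟨hk0, hkl⟩ := pvLastOne_bound xs k hL
            rw [hL] at ih
            simp only [] at ih
            dsimp only
            have e1 : PySem.List.slice (xs ++ [y]) none (some k) = PySem.List.slice xs none (some k) := by
              rw [PySem.List.slice_to _ hk0, PySem.List.slice_to _ hk0,
                List.take_append_of_le_length (le_of_lt hkl)]
            have e2 : PySem.List.slice (xs ++ [y]) (some (k + 1)) none
                = PySem.List.slice xs (some (k + 1)) none ++ [y] := by
              rw [PySem.List.slice_from _ (by omega), PySem.List.slice_from _ (by omega),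
                List.drop_append_of_le_length (by omega : (k + 1).toNat ≤ xs.length)]
            rw [e1, e2]
            by_cases h0 : y = "0" <;> simp [pvGo, h0, h1, pvFlip0, ← ih]

-- ===== VERDICT (by name: the statement is the Claim_ definition above) =====
theorem subtrair1_spec : Claim_equal_subtrair1 := by
  intro value _
  unfold Spec_subtrair1
  simp only [subtrair1, subtrair1_alt]
  have h := pvFoldA_main (value.toList.map (fun c => String.ofList [c])) []
  simp only [List.append_nil] at h
  rw [show PySem.Str.len value - 1
        = ((value.toList.map (fun c => String.ofList [c])).length : Int) - 1 by
      simp [PySem.Str.len_eq]]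
  rw [h, pvB_main]
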